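-- pv_equiv track=rewrite | github.com/changjian-wang/dawning-agent-framework | scripts/wiki_readability_fix.py | has_existing_summary_blockquote
-- ===== SOURCE A (Python) =====
-- def has_existing_summary_blockquote(lines, h1_idx):
--     """Check first 20 non-empty lines after H1 for a `>` blockquote."""
--     seen = 0
--     in_code = False
--     for l in lines[h1_idx+1 : h1_idx+25]:
--         if l.startswith("```") or l.startswith("~~~"):
--             in_code = not in_code
--             continue
--         if in_code:
--             continue
--         s = l.strip()
--         if s.startswith(">"):
--             return True
--         if s.startswith("#"):
--             return False  # next header reached, no summary
--         if s != "":
--             seen += 1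
--             if seen > 5:
--                 return False
--     return False
-- ===== SOURCE B (Python) =====
-- def has_existing_summary_blockquote(lines, h1_idx):
--     """Two-pass: first collect stripped non-empty lines outside code fences,
--     then decide by the position of the first '>'/'#' line (closed-form rule)."""
--     in_code = False
--     effective = []
--     for l in lines[h1_idx + 1 : h1_idx + 25]:
--         if l.startswith("```") or l.startswith("~~~"):
--             in_code = not in_code
--         elif not in_code:
--             s = l.strip()
--             if s != "":
--                 effective.append(s)
--     hit = next(((i, s) for i, s in enumerate(effective)
--                 if s[0] == ">" or s[0] == "#"), None)
--     if hit is None: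
--         return False
--     i, s = hit
--     return s[0] == ">" and i <= 5
-- ===== Notes on version B (the rewrite author's own statement) =====
-- stated objective: alternative
-- what changed: Replaces the single stateful early-return loop (fence toggle + seen counter) by two passes: one pass builds the list of stripped non-empty lines outside code fences, then the answer is a closed-form test on the index of the first '>'/'#' line (True iff it starts with '>' and at most 5 plain lines precede it), eliminating the seen counter and the early returns.
import Mathlib
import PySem

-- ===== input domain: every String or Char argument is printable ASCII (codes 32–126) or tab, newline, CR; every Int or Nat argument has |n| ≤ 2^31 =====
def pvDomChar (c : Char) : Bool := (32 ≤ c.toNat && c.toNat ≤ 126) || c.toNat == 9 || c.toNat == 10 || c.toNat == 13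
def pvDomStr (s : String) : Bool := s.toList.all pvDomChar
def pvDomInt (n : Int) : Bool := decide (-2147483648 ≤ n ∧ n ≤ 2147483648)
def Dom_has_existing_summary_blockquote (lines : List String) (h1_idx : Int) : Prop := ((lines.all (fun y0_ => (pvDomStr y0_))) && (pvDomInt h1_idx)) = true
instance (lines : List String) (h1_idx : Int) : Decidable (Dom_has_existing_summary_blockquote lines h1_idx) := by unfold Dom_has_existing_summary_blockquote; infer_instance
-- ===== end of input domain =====

-- B replaces A's single stateful early-return loop by a fence-stripping pass plus a
-- closed-form test on the index of the first '>'/'#' line (alternative decomposition, same cost).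

-- ===== PORT A =====
-- the for-loop of A, state (seen, in_code); early returns become result values
def pvAgo : List String → Nat → Bool → Bool
  | [], _, _ => false
  | l :: ls, seen, inCode =>
    if PySem.Str.startswith l "```" || PySem.Str.startswith l "~~~" then
      pvAgo ls seen (!inCode)
    else if inCode then
      pvAgo ls seen inCode
    else
      let s := PySem.Str.strip l
      if PySem.Str.startswith s ">" then true
      else if PySem.Str.startswith s "#" then false
      else if s ≠ "" then
        if seen + 1 > 5 then false else pvAgo ls (seen + 1) inCode
      else pvAgo ls seen inCode

def has_existing_summary_blockquote (lines : List String) (h1_idx : Int) : Bool :=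
  pvAgo (PySem.List.slice lines (some (h1_idx + 1)) (some (h1_idx + 25))) 0 false

-- ===== PORT B =====
-- first pass of B: stripped non-empty lines outside code fences
def pvEff : List String → Bool → List String
  | [], _ => []
  | l :: ls, inCode =>
    if PySem.Str.startswith l "```" || PySem.Str.startswith l "~~~" then
      pvEff ls (!inCode)
    else if inCode then pvEff ls inCode
    else
      let s := PySem.Str.strip l
      if s ≠ "" then s :: pvEff ls inCode else pvEff ls inCode

-- B's next(enumerate …): first (index, line) whose first char is '>' or '#'
def pvFindSpecial : List String → Nat → Option (Nat × String)
  | [], _ => none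
  | s :: rest, i =>
    if PySem.Str.pyGet? s 0 == some '>' || PySem.Str.pyGet? s 0 == some '#' then some (i, s)
    else pvFindSpecial rest (i + 1)

def has_existing_summary_blockquote_alt (lines : List String) (h1_idx : Int) : Bool :=
  match pvFindSpecial (pvEff (PySem.List.slice lines (some (h1_idx + 1)) (some (h1_idx + 25))) false) 0 with
  | none => false
  | some (i, s) => (PySem.Str.pyGet? s 0 == some '>') && decide (i ≤ 5)

-- ===== PRECONDITION & SPEC =====
def Spec_has_existing_summary_blockquote (lines : List String) (h1_idx : Int) (out : Bool) : Prop := out = has_existing_summary_blockquote_alt lines h1_idx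
instance (lines : List String) (h1_idx : Int) (out : Bool) : Decidable (Spec_has_existing_summary_blockquote lines h1_idx out) := by unfold Spec_has_existing_summary_blockquote; infer_instance

-- ===== CLAIM (what is proved, stated in full; the proofs are below) =====
def Claim_equal_has_existing_summary_blockquote : Prop := ∀ (lines : List String) (h1_idx : Int), Dom_has_existing_summary_blockquote lines h1_idx → Spec_has_existing_summary_blockquote lines h1_idx (has_existing_summary_blockquote lines h1_idx)

-- ===== LEMMAS AND PROOFS =====

-- a single-character startswith is a test on the first character
lemma sw_single (l : List Char) (c : Char) :
    PySem.Chars.startswith l [c] = (PySem.List.pyGet? l 0 == some c) := by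
  rw [Bool.eq_iff_iff, PySem.Chars.startswith_iff]
  cases l with
  | nil =>
    rw [show PySem.List.pyGet? ([] : List Char) 0 = none from rfl,
        show ((none : Option Char) == some c) = false from rfl]
    simp
  | cons a t =>
    rw [show PySem.List.pyGet? (a :: t) 0 = some a from PySem.List.pyGet?_zero_cons a t]
    constructor
    · intro hp
      obtain ⟨w, hw⟩ := hp
      simp only [List.cons_append, List.nil_append] at hw
      injection hw with h1 _
      subst h1
      exact beq_self_eq_true _
    · intro hb
      have h1 : a = c := Option.some.inj (eq_of_beq hb)
      subst h1
      exact ⟨t, rfl⟩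

lemma sw_gt (s : String) : PySem.Str.startswith s ">" = (PySem.Str.pyGet? s 0 == some '>') := by
  simpa [show (">" : String).toList = ['>'] from rfl] using sw_single s.toList '>'

lemma sw_hash (s : String) : PySem.Str.startswith s "#" = (PySem.Str.pyGet? s 0 == some '#') := by
  simpa [show ("#" : String).toList = ['#'] from rfl] using sw_single s.toList '#'

lemma shift_findSpecial (l : List String) (k : Nat) :
    pvFindSpecial l k = (pvFindSpecial l 0).map (fun p => (p.1 + k, p.2)) := by
  induction l generalizing k with
  | nil => simp [pvFindSpecial]
  | cons s rest ih =>
    simp only [pvFindSpecial]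
    by_cases h : (PySem.Str.pyGet? s 0 == some '>' || PySem.Str.pyGet? s 0 == some '#') = true
    · rw [if_pos h, if_pos h]; simp
    · rw [if_neg h, if_neg h, ih (k + 1), ih 1]
      cases pvFindSpecial rest 0 with
      | none => simp
      | some p => simp; omega

lemma key (ls : List String) (ic : Bool) (seen : Nat) (h : seen ≤ 5) :
    pvAgo ls seen ic = (match pvFindSpecial (pvEff ls ic) 0 with
      | none => false
      | some (i, s) => (PySem.Str.pyGet? s 0 == some '>') && decide (i + seen ≤ 5)) := by
  induction ls generalizing ic seen with
  | nil => simp [pvAgo, pvEff, pvFindSpecial]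
  | cons l ls ih =>
    by_cases hf : (PySem.Str.startswith l "```" || PySem.Str.startswith l "~~~") = true
    · simp only [pvAgo, pvEff, hf, if_true]
      exact ih (!ic) seen h
    · cases ic with
      | true =>
        simp only [pvAgo, pvEff, hf, if_neg, Bool.not_eq_true, if_true]
        exact ih true seen h
      | false =>
        simp only [pvAgo, pvEff, hf, Bool.false_eq_true, if_false]
        generalize PySem.Str.strip l = s
        by_cases hgt : PySem.Str.startswith s ">" = true
        · have h0 : PySem.List.pyGet? s.toList 0 = some '>' := by
            have h1 := (sw_gt s) ▸ hgt
            simpa using h1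
          have hne : s ≠ "" := fun he => absurd hgt (by rw [he]; decide)
          simp [pvFindSpecial, sw_single, hne, h0, h]
        · by_cases hhash : PySem.Str.startswith s "#" = true
          · have h0 : PySem.List.pyGet? s.toList 0 = some '#' := by
              have h1 := (sw_hash s) ▸ hhash
              simpa using h1
            have hne : s ≠ "" := fun he => absurd hhash (by rw [he]; decide)
            simp [pvFindSpecial, sw_single, hne, h0]
          · have hgt' : ¬ PySem.List.pyGet? s.toList 0 = some '>' := by
              rw [sw_gt] at hgt; simpa using hgt
            have hhash' : ¬ PySem.List.pyGet? s.toList 0 = some '#' := by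
              rw [sw_hash] at hhash; simpa using hhash
            by_cases hne : s = ""
            · simp only [hne, ne_eq, not_true_eq_false, if_false,
                show PySem.Str.startswith "" ">" = false from rfl,
                show PySem.Str.startswith "" "#" = false from rfl,
                Bool.false_eq_true, if_false]
              exact ih false seen h
            · have hcond : (PySem.Str.pyGet? s 0 == some '>' || PySem.Str.pyGet? s 0 == some '#') = false := by
                simp [hgt', hhash']
              simp only [hgt, hhash, hne, ne_eq, not_false_eq_true, if_true,
                if_neg, pvFindSpecial, hcond, Bool.false_eq_true]
              rw [shift_findSpecial (pvEff ls false) 1]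
              by_cases h5 : seen + 1 > 5
              · rw [if_pos (by simpa using h5)]
                cases pvFindSpecial (pvEff ls false) 0 with
                | none => simp
                | some p =>
                  have hlt : ¬ (p.1 + 1 + seen ≤ 5) := by omega
                  simp [hlt]
              · rw [if_neg (by simpa using h5), ih false (seen + 1) (by omega)]
                cases pvFindSpecial (pvEff ls false) 0 with
                | none => simp
                | some p =>
                  simp only [Option.map_some]
                  have harith : p.1 + 1 + seen = p.1 + (seen + 1) := by omega
                  simp [harith]

-- ===== VERDICT (by name: the statement is the Claim_ definition above) =====
theorem has_existing_summary_blockquote_spec : Claim_equal_has_existing_summary_blockquote := by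
  intro lines h1_idx _
  unfold Spec_has_existing_summary_blockquote has_existing_summary_blockquote has_existing_summary_blockquote_alt
  exact key _ false 0 (by omega)
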